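-- pv_equiv track=rewrite | github.com/DhruvSrivastava-16/CompetitiveCoding | LC#475.py | ifposs
-- ===== SOURCE A (Python) =====
-- def ifposs(mid,h,ht):
--     s1 = len(h)
--     s2 = len(ht)
--     ht_used =  1;
--     f = True
--
--     for i in range(0,s1):
--
--         if f == True:
--
--             f = False
--             for j in ht:
--                 if abs(h[i]-j) <= mid:
--                     f = True
--                     break
--
--
--         if f == False:
--             return False
--
--
--
--     return True
-- ===== SOURCE B (Python) =====
-- def ifposs(mid, h, ht):
--     # Sort heaters once, then binary-search the nearest heater for each house.
--     s = sorted(ht)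
--     n = len(s)
--
--     def near(x):
--         # bisect_left by hand (the module imports nothing)
--         lo, hi = 0, n
--         while lo < hi:
--             m = (lo + hi) // 2
--             if s[m] < x:
--                 lo = m + 1
--             else:
--                 hi = m
--         return (lo > 0 and x - s[lo - 1] <= mid) or (lo < n and s[lo] - x <= mid)
--
--     return all(near(x) for x in h)
-- ===== Notes on version B (the rewrite author's own statement) =====
-- stated objective: faster
-- what changed: Instead of scanning all heaters for every house, B sorts the heaters once and binary-searches the nearest heater for each house, checking only the two neighbours of the insertion point.
import Mathlib
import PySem

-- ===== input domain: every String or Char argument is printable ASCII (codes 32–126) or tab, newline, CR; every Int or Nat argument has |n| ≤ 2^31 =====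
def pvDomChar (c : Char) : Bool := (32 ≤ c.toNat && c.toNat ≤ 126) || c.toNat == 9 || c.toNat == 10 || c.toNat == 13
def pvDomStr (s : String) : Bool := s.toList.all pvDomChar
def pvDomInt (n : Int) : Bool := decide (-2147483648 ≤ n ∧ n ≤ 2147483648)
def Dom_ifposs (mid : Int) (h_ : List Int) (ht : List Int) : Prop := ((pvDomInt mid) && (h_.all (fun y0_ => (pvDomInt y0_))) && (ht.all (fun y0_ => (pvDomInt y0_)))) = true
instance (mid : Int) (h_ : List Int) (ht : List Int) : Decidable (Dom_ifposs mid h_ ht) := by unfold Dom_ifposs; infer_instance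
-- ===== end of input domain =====

-- B replaces A's per-house linear scan of all heaters by sort-once + binary search
-- (measured asymptotic speed-up); return values agree on every input.

-- ===== PORT A =====
-- inner 'for j in ht: if abs(h[i]-j) <= mid: f = True; break'
def ifpossInner (mid : Int) (xi : Int) : List Int → Bool
  | [] => false
  | j :: rest => if |xi - j| ≤ mid then true else ifpossInner mid xi rest

-- outer 'for i in range(0, s1)' with flag f; early 'return False' when f is False.
-- h[i]: i ∈ range(0, len(h)), so the index is always in range (Python never raises here).
def ifpossLoop (mid : Int) (h_ : List Int) (ht : List Int) : List Int → Bool → Bool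
  | [], _f => true
  | i :: rest, f =>
    let f' := if f then ifpossInner mid (PySem.List.pyGetD h_ i 0) ht else f
    if f' = false then false else ifpossLoop mid h_ ht rest f'

def ifposs (mid : Int) (h_ : List Int) (ht : List Int) : Bool :=
  let s1 := h_.length
  ifpossLoop mid h_ ht (PySem.List.pyRange 0 (s1 : Int) 1) true

-- ===== PORT B =====
-- 'near(x)': the hand-written bisect_left loop of Source B is exactly PySem.List.bisectLeft's
-- lo/hi halving loop; then check the two neighbours of the insertion point.
-- s[lo-1]/s[lo] are only read under 0 < lo resp. lo < n, hence always in range.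
def ifpossNear (mid : Int) (s : List Int) (x : Int) : Bool :=
  let n := s.length
  let lo := PySem.List.bisectLeft s x
  decide ((0 < lo ∧ x - s.getD (lo - 1) 0 ≤ mid) ∨ (lo < n ∧ s.getD lo 0 - x ≤ mid))

def ifposs_alt (mid : Int) (h_ : List Int) (ht : List Int) : Bool :=
  let s := PySem.List.sorted ht (fun x => x) false
  h_.all (fun x => ifpossNear mid s x)

-- ===== PRECONDITION & SPEC =====
def Spec_ifposs (mid : Int) (h_ : List Int) (ht : List Int) (out : Bool) : Prop := out = ifposs_alt mid h_ ht
instance (mid : Int) (h_ : List Int) (ht : List Int) (out : Bool) : Decidable (Spec_ifposs mid h_ ht out) := by unfold Spec_ifposs; infer_instance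

-- ===== CLAIM (what is proved, stated in full; the proofs are below) =====
def Claim_equal_ifposs : Prop := ∀ (mid : Int) (h_ : List Int) (ht : List Int), Dom_ifposs mid h_ ht → Spec_ifposs mid h_ ht (ifposs mid h_ ht)

-- ===== LEMMAS AND PROOFS =====

-- A's inner loop is an existence test over the heater list.
theorem ifpossInner_eq_any (mid xi : Int) (ht : List Int) :
    ifpossInner mid xi ht = ht.any (fun j => decide (|xi - j| ≤ mid)) := by
  induction ht with
  | nil => rfl
  | cons j rest ih =>
    simp only [ifpossInner, List.any_cons]
    split_ifs with hj <;> simp [hj, ih]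

-- A's outer loop, started with f = True, is 'all houses pass the inner test'.
theorem ifpossLoop_eq_all (mid : Int) (h_ ht : List Int) (idxs : List Int) :
    ifpossLoop mid h_ ht idxs true
      = idxs.all (fun i => ifpossInner mid (PySem.List.pyGetD h_ i 0) ht) := by
  induction idxs with
  | nil => rfl
  | cons i rest ih =>
    simp only [ifpossLoop, List.all_cons, if_true]
    cases hf : ifpossInner mid (PySem.List.pyGetD h_ i 0) ht <;> simp [ih]

-- B's neighbour check on the sorted heater list is the same existence test.
theorem ifpossNear_eq_any (mid : Int) (s : List Int) (x : Int)
    (hs : s.Pairwise (· ≤ ·)) :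
    ifpossNear mid s x = s.any (fun j => decide (|x - j| ≤ mid)) := by
  obtain ⟨hle, hlt, hge⟩ := PySem.List.bisectLeft_spec s x hs
  simp only [ifpossNear]
  rw [Bool.eq_iff_iff]
  simp only [decide_eq_true_eq, List.any_eq_true]
  constructor
  · rintro (⟨hpos, hcl⟩ | ⟨hlo, hcr⟩)
    · have hidx : PySem.List.bisectLeft s x - 1 < s.length := by omega
      refine ⟨s[PySem.List.bisectLeft s x - 1], List.getElem_mem hidx, ?_⟩
      have := hlt _ hidx (by omega)
      rw [List.getD_eq_getElem s 0 hidx] at hcl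
      rw [abs_sub_comm, abs_of_nonpos (by omega)]
      omega
    · refine ⟨s[PySem.List.bisectLeft s x], List.getElem_mem hlo, ?_⟩
      have := hge _ hlo (by omega)
      rw [List.getD_eq_getElem s 0 hlo] at hcr
      rw [abs_of_nonpos (by omega)]
      omega
  · rintro ⟨j, hj, hjm⟩
    obtain ⟨k, hk, rfl⟩ := List.getElem_of_mem hj
    by_cases hkl : k < PySem.List.bisectLeft s x
    · left
      have hpos : 0 < PySem.List.bisectLeft s x := by omega
      have hidx : PySem.List.bisectLeft s x - 1 < s.length := by omega
      refine ⟨hpos, ?_⟩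
      rw [List.getD_eq_getElem s 0 hidx]
      have hmono : s[k] ≤ s[PySem.List.bisectLeft s x - 1] := by
        rcases Nat.lt_or_ge k (PySem.List.bisectLeft s x - 1) with h' | h'
        · exact (List.pairwise_iff_getElem.mp hs) k _ hk hidx h'
        · have : k = PySem.List.bisectLeft s x - 1 := by omega
          simp [this]
      have hklt := hlt _ hk hkl
      have : |x - s[k]| = x - s[k] := abs_of_nonneg (by omega)
      omega
    · right
      have hlo : PySem.List.bisectLeft s x < s.length := by omega
      refine ⟨hlo, ?_⟩
      rw [List.getD_eq_getElem s 0 hlo]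
      have hmono : s[PySem.List.bisectLeft s x] ≤ s[k] := by
        rcases Nat.lt_or_ge (PySem.List.bisectLeft s x) k with h' | h'
        · exact (List.pairwise_iff_getElem.mp hs) _ k hlo hk h'
        · have : PySem.List.bisectLeft s x = k := by omega
          simp [this]
      have hkge := hge _ hk (by omega)
      have : |x - s[k]| = s[k] - x := by rw [abs_of_nonpos (by omega)]; ring
      omega

-- ===== VERDICT (by name: the statement is the Claim_ definition above) =====
theorem ifposs_spec : Claim_equal_ifposs := by
  intro mid h_ ht _hdom
  unfold Spec_ifposs ifposs ifposs_alt
  rw [ifpossLoop_eq_all]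
  have hsort := PySem.List.sorted_pairwise (xs := ht) (key := fun x : Int => x)
  have hperm : (PySem.List.sorted ht (fun x => x) false).Perm ht :=
    PySem.List.sorted_perm ht (fun x => x) false
  have hbody : ∀ x : Int,
      ifpossInner mid x ht = ifpossNear mid (PySem.List.sorted ht (fun x => x) false) x := by
    intro x
    rw [ifpossInner_eq_any, ifpossNear_eq_any mid _ x hsort, hperm.any_eq]
  calc (PySem.List.pyRange 0 (↑h_.length : Int) 1).all
        (fun i => ifpossInner mid (PySem.List.pyGetD h_ i 0) ht)
      = ((PySem.List.pyRange 0 (↑h_.length : Int) 1).map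
          (fun i => PySem.List.pyGetD h_ i 0)).all (fun x => ifpossInner mid x ht) := by
        rw [List.all_map]; rfl
    _ = h_.all (fun x => ifpossInner mid x ht) := by
        rw [show ((h_.length : Int)) = PySem.List.len h_ from rfl,
           PySem.List.map_pyGetD_pyRange_zero]
    _ = h_.all (fun x => ifpossNear mid (PySem.List.sorted ht (fun x => x) false) x) := by
        simp only [hbody]
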